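-- pv_equiv track=rewrite | github.com/kaitlin-marie/recursive-en-de-cryption | set4.py | BigEncode
-- ===== SOURCE A (Python) =====
-- Alpha = ['a', 'b', 'c', 'd', 'e', 'f', 'g', 'h', 'i', 'j', 'k', 'l', 'm', 'n', 'o', 'p', 'q', 'r', 's', 't', 'u', 'v', 'w', 'x', 'y', 'z', ' ']
--
-- BigShifts = [3, 0, 0, 0, 9, 3, 0, 0, 8, 7]
--
-- def BigEncode(PlainText):
--     for i, e in enumerate(BigShifts):
--         CodeText = ''
--         Place = i
--         Shift = e
--         for Spot, Letter in enumerate(PlainText):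
--             if Letter in Alpha:
--                 if Spot < Place:
--                     CodeText += Letter
--                 else:
--                     Orig = Alpha.index(Letter)
--                     New = (Orig + Shift) % 27
--                     CodeText += Alpha[New]
--             else:
--                 CodeText += Letter
--         PlainText = CodeText
--     return CodeText
-- ===== SOURCE B (Python) =====
-- Alpha = ['a', 'b', 'c', 'd', 'e', 'f', 'g', 'h', 'i', 'j', 'k', 'l', 'm', 'n', 'o', 'p', 'q', 'r', 's', 't', 'u', 'v', 'w', 'x', 'y', 'z', ' ']
--
-- BigShifts = [3, 0, 0, 0, 9, 3, 0, 0, 8, 7]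
--
-- def BigEncode(PlainText):
--     # index the alphabet once, and prefix-sum the shifts per position:
--     # pass i shifts every alphabet char at position >= i, so position p
--     # receives the sum of BigShifts[0..min(p, len-1)] in total.
--     idx = {c: i for i, c in enumerate(Alpha)}
--     prefix = []
--     t = 0
--     for e in BigShifts:
--         t += e
--         prefix.append(t % 27)
--     out = []
--     for spot, ch in enumerate(PlainText):
--         j = idx.get(ch)
--         if j is None:
--             out.append(ch)
--         else:
--             s = prefix[spot] if spot < len(prefix) else prefix[-1]
--             out.append(Alpha[(j + s) % 27])
--     return ''.join(out)
-- ===== Notes on version B (the rewrite author's own statement) =====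
-- stated objective: faster
-- what changed: Instead of A's ten full re-encoding passes over the text (each doing a linear Alpha membership test and Alpha.index scan per character), B precomputes the per-position prefix sums of the shifts once and encodes in a single pass with an O(1) char-to-index dict lookup.
import Mathlib
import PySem

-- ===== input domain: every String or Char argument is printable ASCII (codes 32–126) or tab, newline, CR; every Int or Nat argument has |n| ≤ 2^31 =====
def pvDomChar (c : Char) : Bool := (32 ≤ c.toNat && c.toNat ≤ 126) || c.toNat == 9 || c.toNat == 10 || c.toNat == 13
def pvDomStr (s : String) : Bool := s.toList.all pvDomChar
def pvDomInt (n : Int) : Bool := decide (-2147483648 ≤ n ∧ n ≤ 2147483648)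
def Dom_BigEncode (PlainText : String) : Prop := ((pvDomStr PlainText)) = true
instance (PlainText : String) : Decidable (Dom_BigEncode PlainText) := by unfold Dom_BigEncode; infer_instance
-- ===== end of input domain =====

-- B replaces A's ten full passes over the text by a single pass using per-position
-- prefix sums of the shifts and a char→index dict (objective: faster, constant factor).

-- ===== PORT A =====
def alphaA : List Char :=
  ['a','b','c','d','e','f','g','h','i','j','k','l','m',
   'n','o','p','q','r','s','t','u','v','w','x','y','z',' ']

def bigShiftsA : List Int := [3, 0, 0, 0, 9, 3, 0, 0, 8, 7]

-- one iteration of A's outer loop: Place = ie.1, Shift = ie.2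
def passA (ie : Int × Int) (plain : List Char) : List Char :=
  (PySem.List.enumerate plain).foldl (fun code sl =>
    if alphaA.contains sl.2 then
      if sl.1 < ie.1 then code ++ [sl.2]
      else
        code ++ [(PySem.List.pyGet? alphaA
          (PySem.Int.mod ((((PySem.List.index? alphaA sl.2).getD 0 : Nat) : Int) + ie.2) 27)).getD ' ']
    else code ++ [sl.2]) []

def BigEncode (PlainText : String) : String :=
  String.mk ((PySem.List.enumerate bigShiftsA).foldl
    (fun plain ie => passA ie plain) PlainText.toList)

-- ===== PORT B =====
def idxB : PySem.Dict Char Int :=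
  PySem.Dict.ofList ((PySem.List.enumerate alphaA).map (fun p => (p.2, p.1)))

def prefixB : List Int :=
  (bigShiftsA.foldl (fun (st : List Int × Int) e =>
    (st.1 ++ [PySem.Int.mod (st.2 + e) 27], st.2 + e)) ([], 0)).1

def BigEncode_alt (PlainText : String) : String :=
  String.mk ((PySem.List.enumerate PlainText.toList).foldl (fun out p =>
    match PySem.Dict.get? idxB p.2 with
    | none => out ++ [p.2]
    | some j =>
      let s : Int :=
        if p.1 < (prefixB.length : Int) then (PySem.List.pyGet? prefixB p.1).getD 0
        else (PySem.List.pyGet? prefixB (-1)).getD 0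
      out ++ [(PySem.List.pyGet? alphaA (PySem.Int.mod (j + s) 27)).getD ' ']) [])

-- ===== PRECONDITION & SPEC =====
def Spec_BigEncode (PlainText : String) (out : String) : Prop := out = BigEncode_alt PlainText
instance (PlainText : String) (out : String) : Decidable (Spec_BigEncode PlainText out) := by unfold Spec_BigEncode; infer_instance

-- ===== CLAIM (what is proved, stated in full; the proofs are below) =====
def Claim_equal_BigEncode : Prop := ∀ (PlainText : String), Dom_BigEncode PlainText → Spec_BigEncode PlainText (BigEncode PlainText)

-- ===== LEMMAS AND PROOFS =====

-- total lookup into the alphabet (proof-side helper)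
def alphaGet (n : Nat) : Char := alphaA.getD n ' '

-- the per-character action of one A-pass
def stepA (i e spot : Int) (c : Char) : Char :=
  if alphaA.contains c then
    if spot < i then c
    else (PySem.List.pyGet? alphaA
      (PySem.Int.mod ((((PySem.List.index? alphaA c).getD 0 : Nat) : Int) + e) 27)).getD ' '
  else c

-- the per-character action of all ten A-passes at position `spot`
def chainStep (spot : Int) (c : Char) : Char :=
  (PySem.List.enumerate bigShiftsA).foldl (fun ch ie => stepA ie.1 ie.2 spot ch) c

-- the per-character action of B at position `spot`
def stepB (spot : Int) (c : Char) : Char :=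
  match PySem.Dict.get? idxB c with
  | none => c
  | some j =>
    let s : Int :=
      if spot < (prefixB.length : Int) then (PySem.List.pyGet? prefixB spot).getD 0
      else (PySem.List.pyGet? prefixB (-1)).getD 0
    (PySem.List.pyGet? alphaA (PySem.Int.mod (j + s) 27)).getD ' '

theorem henum : PySem.List.enumerate bigShiftsA
    = [(0,3),(1,0),(2,0),(3,0),(4,9),(5,3),(6,0),(7,0),(8,8),(9,7)] := by decide

theorem hpre : prefixB = [3, 3, 3, 3, 12, 15, 15, 15, 23, 3] := by decide

theorem hkeys : idxB.keys = alphaA := by decide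

theorem alpha_contains_all : ∀ m ∈ List.range 27, (alphaA.contains (alphaGet m)) = true := by decide

theorem alpha_index_all : ∀ m ∈ List.range 27, PySem.List.index? alphaA (alphaGet m) = some m := by decide

theorem idx_get_all : ∀ m ∈ List.range 27,
    PySem.Dict.get? idxB (alphaGet m) = some (m : Int) := by decide

theorem pyal (j : Int) :
    (PySem.List.pyGet? alphaA (PySem.Int.mod j 27)).getD ' ' = alphaGet ((j % 27).toNat) := by
  rw [PySem.Int.mod_eq_emod_of_pos (by norm_num)]
  have h27 : j % 27 = (((j % 27).toNat : Nat) : Int) := by omega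
  rw [h27, PySem.List.pyGet?_natCast, alphaGet, List.getD_eq_getElem?_getD, Int.toNat_natCast]

theorem stepA_alphaGet (i e spot : Int) (o : Nat) (ho : o < 27) (he : 0 ≤ e) :
    stepA i e spot (alphaGet o)
      = alphaGet (if spot < i then o else (o + e.toNat) % 27) := by
  have hom : o ∈ List.range 27 := List.mem_range.mpr ho
  unfold stepA
  rw [alpha_contains_all o hom, if_pos rfl]
  split_ifs with h
  · rfl
  · rw [alpha_index_all o hom]
    simp only [Option.getD_some]
    rw [pyal]
    refine congrArg alphaGet ?_
    omega

theorem chainStep_not_mem (spot : Int) (c : Char) (hcc : alphaA.contains c = false) :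
    chainStep spot c = c := by
  simp only [chainStep, henum, List.foldl_cons, List.foldl_nil, stepA, hcc,
    Bool.false_eq_true, if_false]

theorem get?_idxB_none (c : Char) (hc : c ∉ alphaA) :
    PySem.Dict.get? idxB c = none := by
  rw [PySem.Dict.get?_eq_none_iff_not_mem_keys, hkeys]
  exact hc

theorem hlen10 : ((prefixB.length : Nat) : Int) = (10 : Int) := by decide

theorem alpha_surj : ∀ c ∈ alphaA, ∃ m ∈ List.range 27, alphaGet m = c := by
  intro c hc
  obtain ⟨o, ho, hco⟩ := List.getElem_of_mem hc
  have ho27 : o < 27 := by simpa [alphaA] using ho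
  refine ⟨o, List.mem_range.mpr ho27, ?_⟩
  rw [alphaGet, List.getD_eq_getElem?_getD, List.getElem?_eq_getElem ho, Option.getD_some]
  exact hco

theorem stepA_m (i e spot : Int) (x : Nat) (he : 0 ≤ e) :
    stepA i e spot (alphaGet (x % 27))
      = alphaGet ((if spot < i then x % 27 else x % 27 + e.toNat) % 27) := by
  rw [stepA_alphaGet i e spot (x % 27) (Nat.mod_lt _ (by norm_num)) he]
  refine congrArg alphaGet ?_
  split_ifs <;> omega

theorem chain_gen (ps : List (Int × Int)) (spot : Int) :
    ∀ (x : Nat), (∀ p ∈ ps, 0 ≤ p.2) →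
      ps.foldl (fun ch ie => stepA ie.1 ie.2 spot ch) (alphaGet (x % 27))
      = alphaGet ((x + ((ps.filter (fun p => !decide (spot < p.1))).map
          (fun p => p.2.toNat)).sum) % 27) := by
  induction ps with
  | nil => intro x _; simp
  | cons a ps ih =>
      intro x hpos
      simp only [List.foldl_cons]
      rw [stepA_m a.1 a.2 spot x (hpos a (List.mem_cons_self))]
      by_cases h : spot < a.1
      · rw [if_pos h, ih (x % 27) (fun p hp => hpos p (List.mem_cons_of_mem _ hp))]
        rw [List.filter_cons]
        simp only [h, decide_true, Bool.not_true, Bool.false_eq_true, if_false]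
        exact congrArg alphaGet (by omega)
      · rw [if_neg h, ih (x % 27 + a.2.toNat) (fun p hp => hpos p (List.mem_cons_of_mem _ hp))]
        rw [List.filter_cons]
        simp only [h, decide_false, Bool.not_false, if_true, List.map_cons, List.sum_cons]
        exact congrArg alphaGet (by omega)

theorem step_pointwise (spot : Int) (hs : 0 ≤ spot) (c : Char) : chainStep spot c = stepB spot c := by
  by_cases hc : c ∈ alphaA
  · obtain ⟨o, hom, rfl⟩ := alpha_surj c hc
    have ho27 : o < 27 := List.mem_range.mp hom
    have homod : alphaGet o = alphaGet (o % 27) := by rw [Nat.mod_eq_of_lt ho27]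
    have hio := idx_get_all (o % 27) (List.mem_range.mpr (Nat.mod_lt _ (by norm_num)))
    rw [homod]
    unfold chainStep
    rw [chain_gen _ spot o (by rw [henum]; decide)]
    simp only [stepB, hio]
    rw [pyal]
    refine congrArg alphaGet ?_
    rw [henum, hlen10, hpre]
    lift spot to ℕ using hs with n
    by_cases h9 : 9 ≤ n
    · have hf : List.filter (fun p => !decide (((n:Nat):Int) < p.1)) [((0:Int),(3:Int)), ((1:Int),(0:Int)), ((2:Int),(0:Int)), ((3:Int),(0:Int)), ((4:Int),(9:Int)), ((5:Int),(3:Int)), ((6:Int),(0:Int)), ((7:Int),(0:Int)), ((8:Int),(8:Int)), ((9:Int),(7:Int))] = [((0:Int),(3:Int)), ((1:Int),(0:Int)), ((2:Int),(0:Int)), ((3:Int),(0:Int)), ((4:Int),(9:Int)), ((5:Int),(3:Int)), ((6:Int),(0:Int)), ((7:Int),(0:Int)), ((8:Int),(8:Int)), ((9:Int),(7:Int))] :=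
        List.filter_eq_self.mpr (by
          intro p hp
          fin_cases hp <;> · simp only [Bool.not_eq_eq_eq_not, Bool.not_true, decide_eq_false_iff_not]; omega)
      rw [hf]
      rw [show (List.map (fun p => p.2.toNat) [((0:Int),(3:Int)), ((1:Int),(0:Int)), ((2:Int),(0:Int)), ((3:Int),(0:Int)), ((4:Int),(9:Int)), ((5:Int),(3:Int)), ((6:Int),(0:Int)), ((7:Int),(0:Int)), ((8:Int),(8:Int)), ((9:Int),(7:Int))]).sum = 30 from by decide]
      split_ifs with hb
      · have hn9 : n = 9 := by omega
        subst hn9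
        rw [PySem.List.pyGet?_natCast]
        rw [show (([3, 3, 3, 3, 12, 15, 15, 15, 23, 3] : List Int)[(9:Nat)]?).getD 0 = (3:Int) from by decide]
        omega
      · rw [show (PySem.List.pyGet? ([3, 3, 3, 3, 12, 15, 15, 15, 23, 3] : List Int) (-1)).getD 0 = (3:Int) from by decide]
        omega
    · push_neg at h9
      interval_cases n
      · -- spot = 0
        simp
        all_goals omega
      · -- spot = 1
        simp
        all_goals omega
      · -- spot = 2
        simp
        all_goals omega
      · -- spot = 3
        simp
        all_goals omega
      · -- spot = 4
        simp
        all_goals omega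
      · -- spot = 5
        simp
        all_goals omega
      · -- spot = 6
        simp
        all_goals omega
      · -- spot = 7
        simp
        all_goals omega
      · -- spot = 8
        simp
        all_goals omega
  · have hcc : alphaA.contains c = false := by simp [hc]
    rw [chainStep_not_mem spot c hcc]
    unfold stepB
    rw [get?_idxB_none c hc]

theorem foldl_push {α β : Type} (h : α → β) :
    ∀ (l : List α) (acc : List β),
      l.foldl (fun a x => a ++ [h x]) acc = acc ++ l.map h := by
  intro l
  induction l with
  | nil => intro acc; simp
  | cons x xs ih => intro acc; simp [List.foldl, ih]

theorem passA_eq_map (ie : Int × Int) :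
    ∀ (xs : List Char) (s : Int) (acc : List Char),
      (PySem.List.enumerate xs s).foldl (fun code sl =>
        if alphaA.contains sl.2 then
          if sl.1 < ie.1 then code ++ [sl.2]
          else
            code ++ [(PySem.List.pyGet? alphaA
              (PySem.Int.mod ((((PySem.List.index? alphaA sl.2).getD 0 : Nat) : Int) + ie.2) 27)).getD ' ']
        else code ++ [sl.2]) acc
      = acc ++ (PySem.List.enumerate xs s).map (fun p => stepA ie.1 ie.2 p.1 p.2) := by
  intro xs
  induction xs with
  | nil => intro s acc; simp [PySem.List.enumerate_nil]
  | cons x xs ih =>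
      intro s acc
      rw [PySem.List.enumerate_cons]
      simp only [List.foldl_cons, List.map_cons]
      rw [ih]
      unfold stepA
      split_ifs <;> simp

theorem passMap_getElem (h : Int × Char → Char) (xs : List Char) (k : Nat) :
    ((PySem.List.enumerate xs).map h)[k]? = xs[k]?.map (fun c => h ((k : Int), c)) := by
  rw [List.getElem?_map, PySem.List.getElem?_enumerate]
  cases xs[k]? <;> simp

theorem foldl_passes (ps : List (Int × Int)) : ∀ (xs : List Char) (k : Nat),
    (ps.foldl (fun plain ie =>
        (PySem.List.enumerate plain).map (fun p => stepA ie.1 ie.2 p.1 p.2)) xs)[k]?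
      = xs[k]?.map (fun c => ps.foldl (fun ch ie => stepA ie.1 ie.2 (k : Int) ch) c) := by
  induction ps with
  | nil => intro xs k; simp
  | cons a ps ih =>
      intro xs k
      simp only [List.foldl_cons]
      rw [ih, passMap_getElem]
      cases xs[k]? <;> simp

theorem BigEncode_eq_map (xs : List Char) :
    (PySem.List.enumerate bigShiftsA).foldl (fun plain ie => passA ie plain) xs
      = (PySem.List.enumerate xs).map (fun p => chainStep p.1 p.2) := by
  have hp : (fun (plain : List Char) (ie : Int × Int) => passA ie plain)
      = fun plain ie => (PySem.List.enumerate plain).map (fun p => stepA ie.1 ie.2 p.1 p.2) := by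
    funext plain ie
    unfold passA
    rw [passA_eq_map ie plain 0 []]
    simp
  rw [hp]
  apply List.ext_getElem?
  intro k
  rw [foldl_passes, passMap_getElem]
  cases xs[k]? <;> simp [chainStep]

theorem stepB_body (out : List Char) (p : Int × Char) :
    (match PySem.Dict.get? idxB p.2 with
    | none => out ++ [p.2]
    | some j =>
      let s : Int :=
        if p.1 < (prefixB.length : Int) then (PySem.List.pyGet? prefixB p.1).getD 0
        else (PySem.List.pyGet? prefixB (-1)).getD 0
      out ++ [(PySem.List.pyGet? alphaA (PySem.Int.mod (j + s) 27)).getD ' '])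
    = out ++ [stepB p.1 p.2] := by
  unfold stepB
  cases PySem.Dict.get? idxB p.2 <;> rfl

-- ===== VERDICT (by name: the statement is the Claim_ definition above) =====
theorem BigEncode_spec : Claim_equal_BigEncode := by
  intro PlainText _
  unfold Spec_BigEncode BigEncode BigEncode_alt
  rw [BigEncode_eq_map]
  have hB : (fun (out : List Char) (p : Int × Char) =>
      match PySem.Dict.get? idxB p.2 with
      | none => out ++ [p.2]
      | some j =>
        let s : Int :=
          if p.1 < (prefixB.length : Int) then (PySem.List.pyGet? prefixB p.1).getD 0
          else (PySem.List.pyGet? prefixB (-1)).getD 0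
        out ++ [(PySem.List.pyGet? alphaA (PySem.Int.mod (j + s) 27)).getD ' '])
      = fun out p => out ++ [stepB p.1 p.2] := by
    funext out p; exact stepB_body out p
  rw [hB, foldl_push (fun p => stepB p.1 p.2) (PySem.List.enumerate PlainText.toList) []]
  simp only [List.nil_append]
  refine congrArg String.mk ?_
  refine List.map_congr_left (fun p hp => ?_)
  rcases (PySem.List.mem_enumerate_iff _ _ _).mp hp with ⟨k, hk, rfl⟩
  exact step_pointwise _ (by omega) _
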